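-- pv_equiv track=rewrite | github.com/fernandogonzalez11/ic1803-taller | tarea 3/tarea3_Fernando_González.py | es_altamente_abundante
-- ===== SOURCE A (Python) =====
-- def suma_de_divisores(num1):
--     # Inicializa las variables a utilizar
--     resultado = 0
--     divisor = 1
--     while divisor < num1:
--         # Suma el divisor solo si el residuo es 0
--         if num1 % divisor == 0:
--             resultado += divisor
--         divisor += 1
--     return resultado
--
-- def es_altamente_abundante(numero):
--     suma_divisores_numero = suma_de_divisores(numero)
--     i = 1
--     while i < numero:
--         if suma_divisores_numero <= suma_de_divisores(i):
--             return False
--         i += 1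
--     return True
-- ===== SOURCE B (Python) =====
-- def _suma_divisores_propios(num):
--     # sqrt-bounded divisor pairing: each divisor d <= sqrt(num) contributes d and num//d
--     total = 0
--     d = 1
--     while d * d <= num:
--         if num % d == 0:
--             if d != num:
--                 total += d
--             q = num // d
--             if q != d and q != num:
--                 total += q
--         d += 1
--     return total
--
-- def es_altamente_abundante(numero):
--     objetivo = _suma_divisores_propios(numero)
--     return all(_suma_divisores_propios(i) < objetivo for i in range(1, numero))
-- ===== Notes on version B (the rewrite author's own statement) =====
-- stated objective: faster
-- what changed: Each proper-divisor sum is computed by sqrt-bounded divisor pairing (adding d and num//d for d*d <= num) instead of trial division over all candidates below num, and the scan over smaller numbers becomes a short-circuiting all(...) generator.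
import Mathlib
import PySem

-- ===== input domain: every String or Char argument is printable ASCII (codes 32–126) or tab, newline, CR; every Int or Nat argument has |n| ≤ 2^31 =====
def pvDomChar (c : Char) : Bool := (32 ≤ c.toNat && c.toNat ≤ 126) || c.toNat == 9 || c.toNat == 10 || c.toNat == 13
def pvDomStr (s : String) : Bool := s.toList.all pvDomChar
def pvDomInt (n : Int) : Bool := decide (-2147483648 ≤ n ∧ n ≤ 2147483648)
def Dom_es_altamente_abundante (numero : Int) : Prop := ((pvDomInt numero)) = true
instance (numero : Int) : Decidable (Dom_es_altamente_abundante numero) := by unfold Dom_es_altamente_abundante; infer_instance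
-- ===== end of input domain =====

-- B computes each proper-divisor sum by sqrt-bounded divisor pairing and compares against the
-- running maximum of the smaller sums (objective: faster, O(n*sqrt n) instead of O(n^2)).

-- ===== PORT A =====
-- while divisor < num1: if num1 % divisor == 0: resultado += divisor; divisor += 1
def pvSumaLoop (num1 resultado divisor : Int) : Int :=
  if divisor < num1 then
    pvSumaLoop num1 (if PySem.Int.mod num1 divisor = 0 then resultado + divisor else resultado)
      (divisor + 1)
  else resultado
termination_by (num1 - divisor).toNat
decreasing_by omega

def suma_de_divisores (num1 : Int) : Int := pvSumaLoop num1 0 1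

-- while i < numero: if suma_divisores_numero <= suma_de_divisores(i): return False; i += 1
def pvEaLoop (numero s i : Int) : Bool :=
  if i < numero then
    if s ≤ suma_de_divisores i then false else pvEaLoop numero s (i + 1)
  else true
termination_by (numero - i).toNat
decreasing_by omega

def es_altamente_abundante (numero : Int) : Bool :=
  pvEaLoop numero (suma_de_divisores numero) 1

-- ===== PORT B =====
-- while d * d <= num: if num % d == 0: (add d if d != num; q = num // d; add q if q != d and q != num); d += 1
def pvSigmaLoop (num total d : Int) : Int :=
  if _h : d * d ≤ num then
    pvSigmaLoop num
      (if PySem.Int.mod num d = 0 then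
        let t1 := if d ≠ num then total + d else total
        let q := PySem.Int.floordiv num d
        if q ≠ d ∧ q ≠ num then t1 + q else t1
      else total) (d + 1)
  else total
termination_by (num + 1 - d).toNat
decreasing_by
  have hd : d ≤ num := by
    rcases le_or_gt d 0 with h0 | h0
    · exact le_trans h0 (le_trans (mul_self_nonneg d) _h)
    · exact le_trans (le_mul_of_one_le_left (by omega) (by omega)) _h
  omega

def sigma_propios (num : Int) : Int := pvSigmaLoop num 0 1

def es_altamente_abundante_alt (numero : Int) : Bool :=
  let objetivo := sigma_propios numero
  (PySem.List.pyRange 1 numero).all (fun i => decide (sigma_propios i < objetivo))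

-- ===== PRECONDITION & SPEC =====
def Spec_es_altamente_abundante (numero : Int) (out : Bool) : Prop := out = es_altamente_abundante_alt numero
instance (numero : Int) (out : Bool) : Decidable (Spec_es_altamente_abundante numero out) := by unfold Spec_es_altamente_abundante; infer_instance

-- ===== CLAIM (what is proved, stated in full; the proofs are below) =====
def Claim_equal_es_altamente_abundante : Prop := ∀ (numero : Int), Dom_es_altamente_abundante numero → Spec_es_altamente_abundante numero (es_altamente_abundante numero)

-- ===== LEMMAS AND PROOFS =====

-- peel the bottom element of an integer Ico sum
theorem pvIco_peel (d R : Int) (f : Int → Int) (h : d < R) :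
    ∑ k ∈ Finset.Ico d R, f k = f d + ∑ k ∈ Finset.Ico (d + 1) R, f k := by
  have : Finset.Ico d R = insert d (Finset.Ico (d + 1) R) := by
    ext x; simp only [Finset.mem_Ico, Finset.mem_insert]; omega
  rw [this, Finset.sum_insert (by simp)]

-- A's trial-division loop sums the divisors in [divisor, num1)
theorem pvSumaLoop_eq (num1 resultado divisor : Int) :
    pvSumaLoop num1 resultado divisor
      = resultado + ∑ k ∈ Finset.Ico divisor num1, (if k ∣ num1 then k else 0) := by
  induction resultado, divisor using pvSumaLoop.induct num1 with
  | case1 r d hlt ih =>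
    simp only [dite_eq_ite] at ih
    rw [pvSumaLoop, if_pos hlt, ih, pvIco_peel d num1 _ hlt]
    simp only [PySem.Int.mod_eq_zero_iff_dvd]
    split_ifs <;> ring
  | case2 r d hlt =>
    rw [pvSumaLoop, if_neg hlt, Finset.Ico_eq_empty (by omega)]
    simp

theorem suma_eq (num : Int) :
    suma_de_divisores num = ∑ k ∈ Finset.Ico 1 num, (if k ∣ num then k else 0) := by
  rw [suma_de_divisores, pvSumaLoop_eq]; ring

-- exclusive upper bound of B's pairing loop
def pvR (num : Int) : Int := (Nat.sqrt num.toNat : Int) + 1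

-- what one small candidate k contributes in B's pairing loop
def pvContrib (num k : Int) : Int :=
  if k ∣ num then
    (if k ≠ num then k else 0)
      + (if PySem.Int.floordiv num k ≠ k ∧ PySem.Int.floordiv num k ≠ num
          then PySem.Int.floordiv num k else 0)
  else 0

theorem pvR_guard {num d : Int} (hd : 1 ≤ d) : d * d ≤ num ↔ d < pvR num := by
  have hdn : ((d.toNat : Int)) = d := Int.toNat_of_nonneg (by omega)
  constructor
  · intro h
    have hnum : 0 ≤ num := le_trans (by nlinarith) h
    have hnn : ((num.toNat : Int)) = num := Int.toNat_of_nonneg hnum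
    have h1 : d.toNat * d.toNat ≤ num.toNat := by
      have : ((d.toNat : Int)) * d.toNat ≤ ((num.toNat : Int)) := by rw [hdn, hnn]; exact h
      exact_mod_cast this
    have := Nat.le_sqrt.mpr h1
    unfold pvR; omega
  · intro h
    unfold pvR at h
    have h1 : d.toNat ≤ Nat.sqrt num.toNat := by omega
    have hpos : 0 < Nat.sqrt num.toNat := by omega
    have hnpos : 0 < num.toNat := Nat.sqrt_pos.mp hpos
    have hnn : ((num.toNat : Int)) = num := Int.toNat_of_nonneg (by omega)
    have h2 : d.toNat * d.toNat ≤ num.toNat := Nat.le_sqrt.mp h1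
    have : ((d.toNat : Int)) * d.toNat ≤ ((num.toNat : Int)) := by exact_mod_cast h2
    rw [hdn, hnn] at this
    exact this

-- B's pairing loop sums the paired contributions over [d, sqrt(num)+1)
theorem pvSigmaLoop_eq (num total d : Int) (hd : 1 ≤ d) :
    pvSigmaLoop num total d = total + ∑ k ∈ Finset.Ico d (pvR num), pvContrib num k := by
  induction total, d using pvSigmaLoop.induct num with
  | case1 t d hg ih =>
    have hdR : d < pvR num := (pvR_guard hd).mp hg
    have ih' := ih (by omega)
    simp only [dite_eq_ite] at ih'
    rw [pvSigmaLoop, dif_pos hg, ih', pvIco_peel d (pvR num) _ hdR]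
    unfold pvContrib
    have hq : PySem.Int.floordiv num d = num / d := PySem.Int.floordiv_eq_ediv_of_pos (by omega)
    simp only [PySem.Int.mod_eq_zero_iff_dvd, hq]
    split_ifs <;> simp <;> ring
  | case2 t d hg =>
    have : pvR num ≤ d := by
      by_contra hc
      exact hg ((pvR_guard hd).mpr (by omega))
    rw [pvSigmaLoop, dif_neg hg, Finset.Ico_eq_empty (by omega)]
    simp

-- basic facts about the complementary divisor num / k
theorem pvDivFacts (num k : Int) (h2 : 2 ≤ num) (hk1 : 1 ≤ k) (hdvd : k ∣ num) :
    num / k ∣ num ∧ 1 ≤ num / k ∧ num / (num / k) = k ∧ k * (num / k) = num := by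
  obtain ⟨c, hc⟩ := hdvd
  have hk0 : k ≠ 0 := by omega
  have hcval : num / k = c := by rw [hc]; exact Int.mul_ediv_cancel_left c hk0
  have hc1 : 1 ≤ c := by nlinarith
  refine ⟨?_, by rw [hcval]; omega, ?_, by rw [hcval]; exact hc.symm⟩
  · exact ⟨k, by rw [hcval, hc]; ring⟩
  · rw [hcval, hc, mul_comm, Int.mul_ediv_cancel_left k (by omega)]

-- the pairing identity: contributions of the small candidates sum to all proper divisors
theorem pvPairing (num : Int) (h2 : 2 ≤ num) :
    ∑ k ∈ Finset.Ico 1 (pvR num), pvContrib num k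
      = ∑ k ∈ Finset.Ico 1 num, (if k ∣ num then k else 0) := by
  -- the small (≤ √num) divisors, and the large (> √num) proper divisors
  have hstepA : (Finset.Ico 1 (pvR num)).filter (fun k => k ∣ num)
      = (Finset.Ico 1 num).filter (fun k => k ∣ num ∧ k * k ≤ num) := by
    ext k
    simp only [Finset.mem_filter, Finset.mem_Ico]
    constructor
    · rintro ⟨⟨h1k, hkR⟩, hdvd⟩
      have hsq : k * k ≤ num := (pvR_guard h1k).mpr hkR
      refine ⟨⟨h1k, ?_⟩, hdvd, hsq⟩
      nlinarith
    · rintro ⟨⟨h1k, _⟩, hdvd, hsq⟩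
      exact ⟨⟨h1k, (pvR_guard h1k).mp hsq⟩, hdvd⟩
  have hbij : ∑ k ∈ (Finset.Ico 1 num).filter
        (fun k => (k ∣ num ∧ k * k ≤ num) ∧ num / k ≠ k ∧ num / k ≠ num), num / k
      = ∑ d ∈ (Finset.Ico 1 num).filter (fun k => k ∣ num ∧ ¬ k * k ≤ num), d := by
    apply Finset.sum_nbij' (fun k => num / k) (fun d => num / d)
    · intro k hk
      simp only [Finset.mem_filter, Finset.mem_Ico] at hk ⊢
      obtain ⟨⟨h1k, hklt⟩, ⟨hdvd, hsq⟩, hne, hnn⟩ := hk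
      obtain ⟨hdvd', h1c, hback, hmul⟩ := pvDivFacts num k h2 h1k hdvd
      have hlt : num / k < num := by
        rcases lt_or_ge (num / k) num with h | h
        · exact h
        · have : num / k ≤ num := Int.le_of_dvd (by omega) hdvd'
          omega
      refine ⟨⟨h1c, hlt⟩, hdvd', ?_⟩
      intro hcon
      have hkc : k ≤ num / k := by nlinarith
      have hqle : num / k ≤ k := by
        have h' : (num / k) * (num / k) ≤ k * (num / k) := by rw [hmul]; exact hcon
        exact le_of_mul_le_mul_right h' (by omega)
      omega
    · intro d hd
      simp only [Finset.mem_filter, Finset.mem_Ico] at hd ⊢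
      obtain ⟨⟨h1d, hdlt⟩, hdvd, hsq⟩ := hd
      obtain ⟨hdvd', h1c, hback, hmul⟩ := pvDivFacts num d h2 h1d hdvd
      have hcd : num / d < d := by nlinarith
      have hcsq : (num / d) * (num / d) ≤ num := by nlinarith
      have hclt : num / d < num := by omega
      exact ⟨⟨h1c, hclt⟩, ⟨hdvd', hcsq⟩, by omega, by omega⟩
    · intro k hk
      simp only [Finset.mem_filter, Finset.mem_Ico] at hk
      exact (pvDivFacts num k h2 hk.1.1 hk.2.1.1).2.2.1
    · intro d hd
      simp only [Finset.mem_filter, Finset.mem_Ico] at hd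
      exact (pvDivFacts num d h2 hd.1.1 hd.2.1).2.2.1
    · intro k _
      rfl
  calc ∑ k ∈ Finset.Ico 1 (pvR num), pvContrib num k
      = ∑ k ∈ (Finset.Ico 1 (pvR num)).filter (fun k => k ∣ num),
          ((if k ≠ num then k else 0)
            + (if PySem.Int.floordiv num k ≠ k ∧ PySem.Int.floordiv num k ≠ num
                then PySem.Int.floordiv num k else 0)) := by
        rw [Finset.sum_filter]
        exact Finset.sum_congr rfl (fun k _ => rfl)
    _ = ∑ k ∈ (Finset.Ico 1 num).filter (fun k => k ∣ num ∧ k * k ≤ num),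
          (k + (if num / k ≠ k ∧ num / k ≠ num then num / k else 0)) := by
        rw [hstepA]
        apply Finset.sum_congr rfl
        intro k hk
        simp only [Finset.mem_filter, Finset.mem_Ico] at hk
        obtain ⟨⟨h1k, hklt⟩, _, _⟩ := hk
        rw [PySem.Int.floordiv_eq_ediv_of_pos (by omega), if_pos (by omega : k ≠ num)]
    _ = ∑ k ∈ (Finset.Ico 1 num).filter (fun k => k ∣ num ∧ k * k ≤ num), k
          + ∑ k ∈ (Finset.Ico 1 num).filter (fun k => k ∣ num ∧ k * k ≤ num),
              (if num / k ≠ k ∧ num / k ≠ num then num / k else 0) := Finset.sum_add_distrib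
    _ = ∑ k ∈ (Finset.Ico 1 num).filter (fun k => k ∣ num ∧ k * k ≤ num), k
          + ∑ d ∈ (Finset.Ico 1 num).filter (fun k => k ∣ num ∧ ¬ k * k ≤ num), d := by
        rw [← hbij, ← Finset.sum_filter (fun k => num / k ≠ k ∧ num / k ≠ num) (fun k => num / k),
          Finset.filter_filter]
    _ = ∑ k ∈ (Finset.Ico 1 num).filter (fun k => k ∣ num), k := by
        rw [← Finset.filter_filter, ← Finset.filter_filter,
          Finset.sum_filter_add_sum_filter_not]
    _ = ∑ k ∈ Finset.Ico 1 num, (if k ∣ num then k else 0) := Finset.sum_filter _ _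

theorem sigma_eq_suma (num : Int) : sigma_propios num = suma_de_divisores num := by
  rcases lt_or_ge num 2 with h | h
  · rcases lt_or_ge num 1 with h0 | h1
    · rw [sigma_propios, pvSigmaLoop, dif_neg (by omega), suma_de_divisores, pvSumaLoop,
        if_neg (by omega)]
    · have h1 : num = 1 := by omega
      subst h1
      rw [sigma_propios, pvSigmaLoop_eq 1 0 1 le_rfl, suma_eq, zero_add]
      have hR : pvR 1 = 2 := by unfold pvR; norm_num
      have hIco : Finset.Ico (1:ℤ) 2 = {1} := by
        ext x; simp only [Finset.mem_Ico, Finset.mem_singleton]; omega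
      rw [hR, hIco, Finset.sum_singleton, Finset.Ico_self, Finset.sum_empty]
      unfold pvContrib
      rw [PySem.Int.floordiv_eq_ediv_of_pos (by norm_num)]
      norm_num
  · rw [sigma_propios, pvSigmaLoop_eq num 0 1 le_rfl, suma_eq, pvPairing num h, zero_add]

-- A's scan returns true iff every smaller index has a strictly smaller divisor sum
theorem pvEaLoop_iff (numero s i : Int) :
    pvEaLoop numero s i = true ↔ ∀ k ∈ Finset.Ico i numero, suma_de_divisores k < s := by
  induction i using pvEaLoop.induct numero s with
  | case1 i hlt hle =>
    rw [pvEaLoop, if_pos hlt, if_pos hle]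
    simp only [Bool.false_eq_true, false_iff]
    intro hall
    exact absurd (hall i (Finset.mem_Ico.mpr ⟨le_refl i, hlt⟩)) (by omega)
  | case2 i hlt hle ih =>
    rw [pvEaLoop, if_pos hlt, if_neg hle, ih]
    constructor
    · intro h k hk
      rw [Finset.mem_Ico] at hk
      rcases eq_or_lt_of_le hk.1 with rfl | h1
      · omega
      · exact h k (Finset.mem_Ico.mpr ⟨by omega, hk.2⟩)
    · intro h k hk
      rw [Finset.mem_Ico] at hk
      exact h k (Finset.mem_Ico.mpr ⟨by omega, hk.2⟩)
  | case3 i hlt =>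
    rw [pvEaLoop, if_neg hlt]
    simp only [true_iff]
    intro k hk
    rw [Finset.mem_Ico] at hk
    omega

-- ===== VERDICT (by name: the statement is the Claim_ definition above) =====
theorem es_altamente_abundante_spec : Claim_equal_es_altamente_abundante := by
  intro numero _
  unfold Spec_es_altamente_abundante es_altamente_abundante es_altamente_abundante_alt
  simp only [sigma_eq_suma]
  rw [Bool.eq_iff_iff, pvEaLoop_iff, List.all_eq_true]
  constructor
  · intro h x hx
    rw [PySem.List.mem_pyRange_one] at hx
    exact decide_eq_true (h x (Finset.mem_Ico.mpr hx))
  · intro h k hk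
    rw [Finset.mem_Ico] at hk
    exact of_decide_eq_true (h k (PySem.List.mem_pyRange_one.mpr hk))
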